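-- pv_equiv track=rewrite | github.com/weider938/dsp_pcm_file | dsp_lib.py | ReturnInvInt
-- ===== SOURCE A (Python) =====
-- def ReturnInvInt(my_int, step=13):
--     if my_int == 0:
--         return 0
--     else:
--         cel_part = my_int
--         return_int = 0
--         ost = -1
--         ost_arr = []
--         while cel_part != 1:
--             ost = cel_part % 2
--             cel_part = cel_part // 2
--             ost_arr.append(ost)
--         ost_arr.append(1)
--         if len(ost_arr) < step:
--             for i in range(0, step - ((len(ost_arr)))):
--                 ost_arr.append(0)
--         cnt = 1
--         for y in ost_arr:
--             if y == 1:
--                 greed_2 = len(ost_arr) - cnt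
--                 return_int = return_int + 2 ** greed_2
--             cnt = cnt + 1
--         return return_int
-- ===== SOURCE B (Python) =====
-- def ReturnInvInt(my_int, step=13):
--     if my_int == 0:
--         return 0
--     width = max(my_int.bit_length(), step)
--     result = 0
--     for i in range(width):
--         result = (result << 1) | ((my_int >> i) & 1)
--     return result
-- ===== Notes on version B (the rewrite author's own statement) =====
-- stated objective: simpler
-- what changed: Replaces A's remainder-list construction, separate zero-padding loop and final 2**k summation pass with a single shift-accumulate loop over max(bit_length, step) bits, with no intermediate list.
import Mathlib
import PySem

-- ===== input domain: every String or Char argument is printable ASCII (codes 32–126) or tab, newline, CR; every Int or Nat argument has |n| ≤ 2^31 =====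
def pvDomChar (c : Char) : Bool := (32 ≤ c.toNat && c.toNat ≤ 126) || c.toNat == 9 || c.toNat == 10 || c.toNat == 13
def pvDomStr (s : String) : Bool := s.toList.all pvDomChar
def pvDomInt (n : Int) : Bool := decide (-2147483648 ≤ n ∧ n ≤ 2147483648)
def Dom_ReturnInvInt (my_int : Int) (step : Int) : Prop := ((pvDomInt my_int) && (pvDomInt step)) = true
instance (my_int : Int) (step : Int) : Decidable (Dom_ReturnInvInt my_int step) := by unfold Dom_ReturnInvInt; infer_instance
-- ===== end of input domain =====

-- B replaces A's remainder-list building, zero-padding loop and 2**k summation by a single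
-- shift-accumulate pass over max(bit_length, step) bits (objective: simpler).

-- ===== PORT A =====
-- A's while loop collecting remainders; the `c ≤ 1` guard makes it total
-- (Python's loop exits at cel_part = 1 and never terminates for cel_part ≤ 0, excluded by Pre_).
def bitsA (c : Int) : List Int :=
  if _h : c ≤ 1 then []
  else PySem.Int.mod c 2 :: bitsA (PySem.Int.floordiv c 2)
termination_by c.toNat
decreasing_by
  have := PySem.Int.floordiv_eq_ediv_of_pos (a := c) (b := 2) (by norm_num)
  rw [this]; omega

def ReturnInvInt (my_int : Int) (step : Int) : Int :=
  if my_int = 0 then 0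
  else
    let arr1 := bitsA my_int ++ [1]
    let arr := if (arr1.length : Int) < step
               then arr1 ++ List.replicate (step - (arr1.length : Int)).toNat 0
               else arr1
    (arr.foldl (fun (p : Int × Int) y =>
        (if y = 1 then p.1 + 2 ^ ((arr.length : Int) - p.2).toNat else p.1, p.2 + 1))
      (0, 1)).1

-- ===== PORT B =====
def ReturnInvInt_alt (my_int : Int) (step : Int) : Int :=
  if my_int = 0 then 0 else
  let width : Int := max (PySem.Int.bitLength my_int : Int) step
  (PySem.List.pyRange 0 width 1).foldl
    (fun result i => PySem.Int.bor (result <<< (1:Nat)) (PySem.Int.band (my_int >>> (i.toNat : Int)) 1)) 0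

-- ===== PRECONDITION & SPEC =====
-- Pre_ excludes negative my_int, on which A's `while cel_part != 1` loop never terminates
-- (cel_part // 2 stabilises at -1), so A returns no value there.
def Pre_ReturnInvInt (my_int : Int) (step : Int) : Prop := 0 ≤ my_int
instance (my_int : Int) (step : Int) : Decidable (Pre_ReturnInvInt my_int step) := by
  unfold Pre_ReturnInvInt; infer_instance
def pvWitness_ReturnInvInt : Int × Int := (13, 5)

def Spec_ReturnInvInt (my_int : Int) (step : Int) (out : Int) : Prop := out = ReturnInvInt_alt my_int step
instance (my_int : Int) (step : Int) (out : Int) : Decidable (Spec_ReturnInvInt my_int step out) := by unfold Spec_ReturnInvInt; infer_instance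

-- ===== CLAIM (what is proved, stated in full; the proofs are below) =====
def Claim_equal_ReturnInvInt : Prop := ∀ (my_int : Int) (step : Int), Dom_ReturnInvInt my_int step → Pre_ReturnInvInt my_int step → Spec_ReturnInvInt my_int step (ReturnInvInt my_int step)

-- ===== LEMMAS AND PROOFS =====

-- the j-th binary digit of m, as an Int
def pvBit (m j : Nat) : Int := (((m >>> j) % 2 : Nat) : Int)

theorem pvBit01 (m j : Nat) : pvBit m j = 0 ∨ pvBit m j = 1 := by unfold pvBit; omega

theorem pvBit_succ (m j : Nat) : pvBit m (j+1) = pvBit (m/2) j := by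
  unfold pvBit; rw [Nat.shiftRight_succ_inside]

-- characterisation of A's remainder list (LSB first, ending in the leading 1)
theorem bitsA_char (m : Nat) (hm : 1 ≤ m) :
    bitsA (m : Int) ++ [1] =
      (List.range (PySem.Int.bitLength (m : Int))).map (pvBit m) := by
  induction m using Nat.strong_induction_on with
  | _ m ih =>
  rcases Nat.lt_or_ge m 2 with h2 | h2
  · have : m = 1 := by omega
    subst this
    rw [bitsA]
    norm_num
    decide
  · have hpos : (0:Nat) < m := by omega
    rw [bitsA, dif_neg (by exact_mod_cast by omega)]
    rw [PySem.Int.bitLength_natCast hpos, List.range_succ_eq_map, List.map_cons]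
    have e1 : PySem.Int.mod (m : Int) 2 = pvBit m 0 := by
      rw [show ((2:Int)) = ((2:Nat):Int) by norm_num, PySem.Int.mod_natCast]
      unfold pvBit; simp
    have e2 : PySem.Int.floordiv (m : Int) 2 = ((m/2 : Nat) : Int) := by
      exact_mod_cast PySem.Int.floordiv_natCast m 2
    rw [e1, e2, List.cons_append]
    congr 1
    rw [ih (m/2) (by omega) (by omega)]
    rw [List.map_map]
    congr 1
    funext j
    simp [Function.comp, pvBit_succ]

-- bits above the bit length are zero
theorem bit_high (m j : Nat) (hj : PySem.Int.bitLength (m : Int) ≤ j) : pvBit m j = 0 := by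
  have h := PySem.Int.lt_two_pow_bitLength (m : Int)
  have hm : m < 2 ^ PySem.Int.bitLength (m:Int) := by simpa using h
  have : m >>> j = 0 := by
    rw [Nat.shiftRight_eq_div_pow]
    exact Nat.div_eq_of_lt (lt_of_lt_of_le hm (Nat.pow_le_pow_right (by norm_num) hj))
  unfold pvBit; rw [this]; rfl

-- padding the bit list with zeros extends the range
theorem arr_pad (m k : Nat) :
    (List.range (PySem.Int.bitLength (m:Int))).map (pvBit m) ++ List.replicate k 0
      = (List.range (PySem.Int.bitLength (m:Int) + k)).map (pvBit m) := by
  rw [List.range_add, List.map_append]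
  congr 1
  rw [List.map_map]
  have hmem : ∀ b ∈ (List.range k).map (pvBit m ∘ (PySem.Int.bitLength (m:Int) + ·)), b = (0:Int) := by
    intro b hb
    obtain ⟨j, hj, rfl⟩ := List.mem_map.mp hb
    exact bit_high m _ (by simp)
  have h := List.eq_replicate_of_mem hmem
  simpa using h.symm

-- Horner shift: folding from accumulator a
theorem foldMSB_shift (l : List Int) (a : Int) :
    l.foldl (fun r y => 2*r + y) a = a * 2 ^ l.length + l.foldl (fun r y => 2*r + y) 0 := by
  induction l generalizing a with
  | nil => simp
  | cons y t ih =>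
    simp only [List.foldl_cons, List.length_cons]
    rw [ih (2*a + y), ih (2*0 + y)]
    ring

-- A's counting fold equals the MSB-first Horner fold
theorem foldA_eq (l : List Int) (L : Nat) (r c : Int)
    (hc : c = (L : Int) - l.length + 1) (hlen : l.length ≤ L)
    (hy : ∀ y ∈ l, y = 0 ∨ y = 1) :
    (l.foldl (fun (p : Int × Int) y =>
        (if y = 1 then p.1 + 2 ^ ((L : Int) - p.2).toNat else p.1, p.2 + 1)) (r, c)).1
      = r + l.foldl (fun a y => 2*a + y) 0 := by
  induction l generalizing r c with
  | nil => simp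
  | cons y t ih =>
    simp only [List.foldl_cons, List.length_cons] at *
    have hexp : ((L : Int) - c).toNat = t.length := by omega
    have step1 : (if y = 1 then r + 2 ^ ((L : Int) - c).toNat else r) = r + y * 2 ^ t.length := by
      rcases hy y (by simp) with rfl | rfl <;> simp [hexp]
    rw [step1, ih _ (c+1) (by omega) (by omega) (fun z hz => hy z (by simp [hz]))]
    rw [foldMSB_shift t (2*0 + y)]
    ring

theorem nat_or_one (k : Nat) : 2*k ||| 1 = 2*k + 1 := by
  apply Nat.eq_of_testBit_eq
  intro i
  cases i with
  | zero => simp [Nat.testBit_zero]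
  | succ j =>
    rw [Nat.testBit_or, Nat.testBit_add_one, Nat.testBit_add_one, Nat.testBit_add_one]
    have h1 : 2*k/2 = k := by omega
    have h2 : (2*k+1)/2 = k := by omega
    have h3 : (1:Nat)/2 = 0 := by norm_num
    rw [h1, h2, h3]
    simp

-- B's loop body `(result << 1) | bit` is `2*result + bit`
theorem bor_shift (a y : Int) (ha : 0 ≤ a) (hy : y = 0 ∨ y = 1) :
    PySem.Int.bor (a <<< (1:Nat)) y = 2*a + y := by
  have hsh : a <<< (1:Nat) = 2*a := by rw [Int.shiftLeft_eq]; ring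
  rcases hy with rfl | rfl
  · rw [hsh, PySem.Int.bor_zero]; ring
  · rw [hsh]
    unfold PySem.Int.bor
    rw [if_pos (by omega), if_pos (by norm_num)]
    have h4 : (2*a).toNat = 2*a.toNat := by omega
    rw [h4, show (1:Int).toNat = 1 from rfl, nat_or_one]
    omega

theorem band_bit (m j : Nat) : PySem.Int.band ((m : Int) >>> (j : Int)) 1 = pvBit m j := by
  rw [PySem.Int.band_one, Int.shiftRight_natCast]
  rw [show (2:Int) = ((2:Nat):Int) from rfl, PySem.Int.mod_natCast]
  rfl

-- B's fold is the Horner fold on the bits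
theorem foldB_eq (m : Nat) (l : List Int) (a : Int) (ha : 0 ≤ a) :
    l.foldl (fun result i =>
        PySem.Int.bor (result <<< (1:Nat)) (PySem.Int.band ((m : Int) >>> (i.toNat : Int)) 1)) a
      = l.foldl (fun r i => 2*r + pvBit m i.toNat) a := by
  induction l generalizing a with
  | nil => rfl
  | cons i t ih =>
    simp only [List.foldl_cons]
    rw [band_bit, bor_shift a _ ha (pvBit01 m i.toNat)]
    exact ih _ (by rcases pvBit01 m i.toNat with h | h <;> omega)

-- closed form for port A on positive input
theorem A_val (m : Nat) (step : Int) (hm : 1 ≤ m) :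
    ReturnInvInt (m:Int) step =
      ((List.range (max ((PySem.Int.bitLength (m:Int) : Int)) step).toNat).map (pvBit m)).foldl
        (fun a y => 2*a + y) 0 := by
  rw [ReturnInvInt, if_neg (by exact_mod_cast by omega)]
  have hchar := bitsA_char m hm
  set B0 := PySem.Int.bitLength (m:Int) with hB0
  show ((if ((bitsA (m:Int) ++ ([1] : List Int)).length : Int) < step
          then (bitsA (m:Int) ++ ([1] : List Int)) ++ List.replicate (step - ((bitsA (m:Int) ++ ([1] : List Int)).length : Int)).toNat (0:Int)
          else bitsA (m:Int) ++ ([1] : List Int)).foldl _ (0,1)).1 = _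
  rw [hchar]
  have hlen1 : ((List.range B0).map (pvBit m)).length = B0 := by simp
  rw [hlen1]
  by_cases h : (B0 : Int) < step
  · rw [if_pos h, arr_pad]
    have hL : B0 + (step - (B0:Int)).toNat = (max (B0:Int) step).toNat := by omega
    rw [hL]
    simp only [List.length_map, List.length_range]
    rw [foldA_eq _ ((max (B0:Int) step).toNat) 0 1 (by simp) (by simp)
      (by intro y hy; obtain ⟨j, _, rfl⟩ := List.mem_map.mp hy; exact pvBit01 m j)]
    ring
  · rw [if_neg h]
    have hL : B0 = (max (B0:Int) step).toNat := by omega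
    rw [← hL]
    simp only [List.length_map, List.length_range]
    rw [foldA_eq _ B0 0 1 (by simp) (by simp)
      (by intro y hy; obtain ⟨j, _, rfl⟩ := List.mem_map.mp hy; exact pvBit01 m j)]
    ring

-- closed form for port B on nonnegative input
theorem B_val (m : Nat) (step : Int) (hm : 1 ≤ m) :
    ReturnInvInt_alt (m:Int) step =
      ((List.range (max ((PySem.Int.bitLength (m:Int) : Int)) step).toNat).map (pvBit m)).foldl
        (fun a y => 2*a + y) 0 := by
  rw [ReturnInvInt_alt, if_neg (by exact_mod_cast by omega)]
  show (PySem.List.pyRange 0 (max ((PySem.Int.bitLength (m:Int) : Int)) step) 1).foldl _ 0 = _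
  rw [PySem.List.pyRange_one, foldB_eq m _ 0 le_rfl]
  rw [List.foldl_map, List.foldl_map]
  have : (max ((PySem.Int.bitLength (m:Int) : Int)) step - 0).toNat
       = (max ((PySem.Int.bitLength (m:Int) : Int)) step).toNat := by omega
  rw [this]
  simp

-- ===== VERDICT (by name: the statement is the Claim_ definition above) =====
theorem ReturnInvInt_spec : Claim_equal_ReturnInvInt := by
  intro my_int step _ hpre
  unfold Pre_ReturnInvInt at hpre
  unfold Spec_ReturnInvInt
  obtain ⟨m, rfl⟩ : ∃ m : Nat, my_int = (m : Int) := ⟨my_int.toNat, (Int.toNat_of_nonneg hpre).symm⟩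
  rcases Nat.eq_zero_or_pos m with rfl | hm
  · norm_num [ReturnInvInt, ReturnInvInt_alt]
  · rw [A_val m step hm, B_val m step hm]
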